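-- pv_equiv track=rewrite | github.com/leonlan/projecteuler | pe051_075/pe057.py | square_root_convergents
-- ===== SOURCE A (Python) =====
-- def square_root_convergents(n):
--     """Returns how many of the first n-expansions fractions contain a
--     numerator with more digits than the denominator."""
--     count = 0
--     for i in range(n):
--         frac = [1, 2]
--         for j in range(i, 0, -1):
--             frac[0] += 2*frac[1]
--             frac = frac[::-1]
--         frac[0] += frac[1]
--         if len(str(frac[0])) > len(str(frac[1])):
--             count += 1
--     return(count)
-- ===== SOURCE B (Python) =====
-- def square_root_convergents(n):
--     """Returns how many of the first n-expansions fractions contain a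
--     numerator with more digits than the denominator."""
--     count = 0
--     a, b = 1, 2
--     for _ in range(n):
--         if len(str(a + b)) > len(str(b)):
--             count += 1
--         a, b = b, a + 2*b
--     return count
-- ===== Notes on version B (the rewrite author's own statement) =====
-- stated objective: faster
-- what changed: B replaces A's nested loop (recomputing each convergent from scratch) with a single pass that carries the convergent pair (a,b) through the recurrence a,b = b, a+2b.
import Mathlib
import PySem

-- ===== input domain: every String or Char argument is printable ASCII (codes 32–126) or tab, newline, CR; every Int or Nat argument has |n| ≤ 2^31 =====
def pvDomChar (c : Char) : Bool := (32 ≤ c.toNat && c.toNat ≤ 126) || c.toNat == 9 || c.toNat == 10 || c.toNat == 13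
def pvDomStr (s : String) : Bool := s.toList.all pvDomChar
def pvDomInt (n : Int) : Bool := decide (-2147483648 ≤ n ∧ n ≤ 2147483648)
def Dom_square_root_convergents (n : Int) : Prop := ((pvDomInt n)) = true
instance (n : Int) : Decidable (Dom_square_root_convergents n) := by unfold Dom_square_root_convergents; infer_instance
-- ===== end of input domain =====

-- B replaces A's nested loop (recomputing each convergent from scratch) with one pass
-- carrying the pair (a,b) through the recurrence a,b = b, a+2b (faster: O(n) vs O(n^2) bigint ops).

-- ===== PORT A =====
-- frac is always a 2-element list in A; it is ported as the pair (frac[0], frac[1]).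
def square_root_convergents (n : Int) : Int :=
  (PySem.List.pyRange 0 n 1).foldl
    (fun count i =>
      let frac : Int × Int := (1, 2)
      let frac := (PySem.List.pyRange i 0 (-1)).foldl
        (fun frac _ =>
          let frac := (frac.1 + 2 * frac.2, frac.2)  -- frac[0] += 2*frac[1]
          (frac.2, frac.1))                          -- frac = frac[::-1]
        frac
      let frac := (frac.1 + frac.2, frac.2)          -- frac[0] += frac[1]
      if PySem.Str.len (PySem.Int.toStr frac.1) > PySem.Str.len (PySem.Int.toStr frac.2)
      then count + 1 else count)
    0

-- ===== PORT B =====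
def square_root_convergents_alt (n : Int) : Int :=
  (((PySem.List.pyRange 0 n 1).foldl
    (fun (st : Int × Int × Int) _ =>
      let count := st.1
      let a := st.2.1
      let b := st.2.2
      let count :=
        if PySem.Str.len (PySem.Int.toStr (a + b)) > PySem.Str.len (PySem.Int.toStr b)
        then count + 1 else count
      (count, b, a + 2 * b))
    (0, 1, 2)) : Int × Int × Int).1

-- ===== PRECONDITION & SPEC =====
def Spec_square_root_convergents (n : Int) (out : Int) : Prop := out = square_root_convergents_alt n
instance (n : Int) (out : Int) : Decidable (Spec_square_root_convergents n out) := by unfold Spec_square_root_convergents; infer_instance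

-- ===== CLAIM (what is proved, stated in full; the proofs are below) =====
def Claim_equal_square_root_convergents : Prop := ∀ (n : Int), Dom_square_root_convergents n → Spec_square_root_convergents n (square_root_convergents n)

-- ===== LEMMAS AND PROOFS =====

-- the shared convergent step and digit-count test
def pvStep (p : Int × Int) : Int × Int := (p.2, p.1 + 2 * p.2)

-- state of the i-th expansion before the final frac[0] += frac[1]
def pvSt : Nat → Int × Int
  | 0 => (1, 2)
  | k + 1 => pvStep (pvSt k)

-- count over the first m expansions
def pvCnt : Nat → Int
  | 0 => 0
  | k + 1 => pvCnt k +
      (if PySem.Str.len (PySem.Int.toStr ((pvSt k).1 + (pvSt k).2)) >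
          PySem.Str.len (PySem.Int.toStr (pvSt k).2) then 1 else 0)

lemma pvFoldl_const {α β : Type} (g : α → α) (l : List β) (init : α) :
    l.foldl (fun x _ => g x) init = g^[l.length] init := by
  induction l generalizing init with
  | nil => rfl
  | cons x xs ih => simp [List.foldl, ih, Function.iterate_succ_apply]

lemma pvSt_eq_iterate (m : Nat) : pvSt m = pvStep^[m] (1, 2) := by
  induction m with
  | zero => rfl
  | succ k ih => simp [pvSt, ih, Function.iterate_succ_apply']

-- the inner loop of A computes pvSt i (for i ≥ 0)
lemma pvInner_eq (i : Int) (hi : 0 ≤ i) :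
    (PySem.List.pyRange i 0 (-1)).foldl
      (fun (frac : Int × Int) _ =>
        let frac := (frac.1 + 2 * frac.2, frac.2)
        (frac.2, frac.1)) (1, 2) = pvSt i.toNat := by
  have h : (fun (frac : Int × Int) (_ : Int) =>
      let frac := (frac.1 + 2 * frac.2, frac.2)
      (frac.2, frac.1)) = fun frac _ => pvStep frac := by
    funext f j; simp [pvStep]
  rw [h, pvFoldl_const pvStep, pvSt_eq_iterate, PySem.List.length_pyRange_neg_one]
  congr 1
  omega

lemma pvA_eq (m : Nat) :
    square_root_convergents (m : Int) = pvCnt m := by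
  induction m with
  | zero => simp [square_root_convergents, PySem.List.pyRange_one_eq_nil, pvCnt]
  | succ k ih =>
    unfold square_root_convergents at ih ⊢
    rw [show ((k + 1 : Nat) : Int) = (k : Int) + 1 by push_cast; ring,
        PySem.List.pyRange_one_succ_right (by positivity), List.foldl_append, ih]
    simp only [List.foldl]
    rw [pvInner_eq (k : Int) (by positivity)]
    simp only [pvCnt, Int.toNat_natCast]
    split_ifs <;> omega

lemma pvB_eq (m : Nat) :
    ((PySem.List.pyRange 0 (m : Int) 1).foldl
      (fun (st : Int × Int × Int) _ =>
        let count := st.1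
        let a := st.2.1
        let b := st.2.2
        let count :=
          if PySem.Str.len (PySem.Int.toStr (a + b)) > PySem.Str.len (PySem.Int.toStr b)
          then count + 1 else count
        (count, b, a + 2 * b))
      (0, 1, 2)) = (pvCnt m, pvSt m) := by
  induction m with
  | zero => simp [PySem.List.pyRange_one_eq_nil, pvCnt, pvSt]
  | succ k ih =>
    rw [show ((k + 1 : Nat) : Int) = (k : Int) + 1 by push_cast; ring,
        PySem.List.pyRange_one_succ_right (by positivity), List.foldl_append, ih]
    simp only [List.foldl, pvCnt, pvSt, pvStep]
    rw [Prod.mk.injEq]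
    refine ⟨by split_ifs <;> omega, rfl⟩

lemma pvA_all (n : Int) : square_root_convergents n = pvCnt n.toNat := by
  rcases (by omega : n ≤ 0 ∨ 0 < n) with h | h
  · rw [show n.toNat = 0 by omega]
    simp [square_root_convergents, PySem.List.pyRange_one_eq_nil h, pvCnt]
  · have := pvA_eq n.toNat
    rwa [Int.toNat_of_nonneg h.le] at this

lemma pvB_all (n : Int) : square_root_convergents_alt n = pvCnt n.toNat := by
  rcases (by omega : n ≤ 0 ∨ 0 < n) with h | h
  · rw [show n.toNat = 0 by omega]
    simp [square_root_convergents_alt, PySem.List.pyRange_one_eq_nil h, pvCnt]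
  · unfold square_root_convergents_alt
    rw [← Int.toNat_of_nonneg h.le, pvB_eq]
    simp only [Int.toNat_natCast]

-- ===== VERDICT (by name: the statement is the Claim_ definition above) =====
theorem square_root_convergents_spec : Claim_equal_square_root_convergents := by
  intro n _
  unfold Spec_square_root_convergents
  rw [pvA_all, pvB_all]
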